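-- pv_equiv track=rewrite | github.com/the-deep-nlp/core-server | nlp_scripts/model_prediction/utils.py | get_tag_ids
-- ===== SOURCE A (Python) =====
-- def get_tag_ids(total_tags, taglist, idx=0):
--     """
--     Retrieves the tag IDs
--     """
--     for tag in total_tags[idx]:
--         if tag["key"] == taglist[idx]:
--             if idx >= len(total_tags) - 1:
--                 return [tag.get("id", None)]
--             else:
--                 return [tag.get("id", None)] + get_tag_ids(
--                     total_tags, taglist, idx=idx + 1
--                 )
--     return [None]
-- ===== SOURCE B (Python) =====
-- def get_tag_ids(total_tags, taglist, idx=0):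
--     """
--     Retrieves the tag IDs (iterative version with a result accumulator).
--     """
--     result = []
--     i = idx
--     last = len(total_tags) - 1
--     while True:
--         found = next((tag for tag in total_tags[i] if tag["key"] == taglist[i]), None)
--         if found is None:
--             result.append(None)
--             return result
--         result.append(found.get("id", None))
--         if i >= last:
--             return result
--         i += 1
-- ===== Notes on version B (the rewrite author's own statement) =====
-- stated objective: alternative
-- what changed: Replaces A's recursion that builds the result by list concatenation on the way back with an iterative while-loop over the level index that keeps a result accumulator and finds each level's first matching tag with next()/find?.
import Mathlib
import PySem

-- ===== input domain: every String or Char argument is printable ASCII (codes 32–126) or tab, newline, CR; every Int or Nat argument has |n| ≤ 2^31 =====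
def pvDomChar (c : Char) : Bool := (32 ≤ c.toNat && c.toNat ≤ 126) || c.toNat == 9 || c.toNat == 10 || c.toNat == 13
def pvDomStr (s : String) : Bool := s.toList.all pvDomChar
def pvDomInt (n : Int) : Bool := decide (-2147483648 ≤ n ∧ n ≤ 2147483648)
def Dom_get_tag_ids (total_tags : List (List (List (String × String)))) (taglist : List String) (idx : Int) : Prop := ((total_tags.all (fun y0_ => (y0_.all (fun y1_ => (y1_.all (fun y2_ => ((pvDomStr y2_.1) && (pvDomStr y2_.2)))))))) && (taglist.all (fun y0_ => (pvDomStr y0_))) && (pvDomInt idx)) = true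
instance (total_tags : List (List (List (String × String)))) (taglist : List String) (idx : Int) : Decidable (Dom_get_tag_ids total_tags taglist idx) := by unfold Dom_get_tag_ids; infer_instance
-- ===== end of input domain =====

-- B replaces A's list-building recursion by an iterative level loop with a result
-- accumulator and a first-match search per level (objective: alternative decomposition).

-- first-match association-list lookup: tag.get(k, None) / tag[k] (None = KeyError)
def pvLookup (tag : List (String × String)) (k : String) : Option String :=
  (tag.find? (fun kv => kv.1 == k)).map (·.2)

-- ===== PORT A =====
-- 'for tag in total_tags[idx]: …' with early return, recursing on idx+1.
-- Under Pre_ every pyGet?/lookup succeeds, so the .getD [] defaults and the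
-- Option-level '==' (tag["key"] == taglist[idx]) are exact.
def getTagIdsGo (tt : List (List (List (String × String)))) (tl : List String)
    (idx : Int) (level : List (List (String × String))) : List (Option String) :=
  match level with
  | [] => [none]
  | tag :: rest =>
    if pvLookup tag "key" == PySem.List.pyGet? tl idx then
      if idx ≥ (tt.length : Int) - 1 then [pvLookup tag "id"]
      else [pvLookup tag "id"] ++ getTagIdsGo tt tl (idx + 1) ((PySem.List.pyGet? tt (idx + 1)).getD [])
    else getTagIdsGo tt tl idx rest
termination_by (((tt.length : Int) - idx).toNat, level.length)
decreasing_by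
  · apply Prod.Lex.left; omega
  · apply Prod.Lex.right; simp

def get_tag_ids (total_tags : List (List (List (String × String)))) (taglist : List String) (idx : Int) : List (Option String) :=
  getTagIdsGo total_tags taglist idx ((PySem.List.pyGet? total_tags idx).getD [])

-- ===== PORT B =====
-- 'while True' loop: find the first matching tag of level i, append, advance i.
def getTagIdsLoop (tt : List (List (List (String × String)))) (tl : List String)
    (i : Int) (acc : List (Option String)) : List (Option String) :=
  match ((PySem.List.pyGet? tt i).getD []).find?
      (fun tag => pvLookup tag "key" == PySem.List.pyGet? tl i) with
  | none => acc ++ [none]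
  | some tag =>
    let acc' := acc ++ [pvLookup tag "id"]
    if i ≥ (tt.length : Int) - 1 then acc' else getTagIdsLoop tt tl (i + 1) acc'
termination_by ((tt.length : Int) - i).toNat
decreasing_by omega

def get_tag_ids_alt (total_tags : List (List (List (String × String)))) (taglist : List String) (idx : Int) : List (Option String) :=
  getTagIdsLoop total_tags taglist idx []

-- ===== PRECONDITION & SPEC =====
-- the scan of one level is raise-free: if the level is nonempty, the taglist index
-- was valid and every tag before the first match carries a "key" entry
def pvLevelOk (L : List (List (String × String))) (t : Option String) : Bool :=
  match L with
  | [] => true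
  | _ => t.isSome &&
      (L.takeWhile (fun tag => pvLookup tag "key" != t)).all
        (fun tag => (pvLookup tag "key").isSome)

-- some tag of the level matches the target (the recursion descends one level)
def pvMatched (L : List (List (String × String))) (t : Option String) : Bool :=
  L.any (fun tag => pvLookup tag "key" == t)

-- Pre_ holds exactly when A raises no exception: idx indexes total_tags (Python's
-- negative wraparound included), and every level the recursion reaches (all earlier
-- levels matched) scans without a KeyError/IndexError.
def Pre_get_tag_ids (total_tags : List (List (List (String × String)))) (taglist : List String) (idx : Int) : Prop :=
  PySem.Raise.InRange total_tags.length idx ∧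
  ∀ k : Nat, k < ((total_tags.length : Int) - idx).toNat →
    ((∀ m : Nat, m < k →
        pvMatched ((PySem.List.pyGet? total_tags (idx + m)).getD [])
          (PySem.List.pyGet? taglist (idx + m)) = true) →
      pvLevelOk ((PySem.List.pyGet? total_tags (idx + k)).getD [])
        (PySem.List.pyGet? taglist (idx + k)) = true)

instance (total_tags : List (List (List (String × String)))) (taglist : List String) (idx : Int) : Decidable (Pre_get_tag_ids total_tags taglist idx) := by
  unfold Pre_get_tag_ids; infer_instance

def pvWitness_get_tag_ids : (List (List (List (String × String)))) × List String × Int :=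
  ([[[("key", "a"), ("id", "1")]], [[("key", "b"), ("id", "2")]]], ["a", "b"], 0)

def Spec_get_tag_ids (total_tags : List (List (List (String × String)))) (taglist : List String) (idx : Int) (out : List (Option String)) : Prop := out = get_tag_ids_alt total_tags taglist idx
instance (total_tags : List (List (List (String × String)))) (taglist : List String) (idx : Int) (out : List (Option String)) : Decidable (Spec_get_tag_ids total_tags taglist idx out) := by unfold Spec_get_tag_ids; infer_instance

-- ===== CLAIM (what is proved, stated in full; the proofs are below) =====
def Claim_equal_get_tag_ids : Prop := ∀ (total_tags : List (List (List (String × String)))) (taglist : List String) (idx : Int), Dom_get_tag_ids total_tags taglist idx → Pre_get_tag_ids total_tags taglist idx → Spec_get_tag_ids total_tags taglist idx (get_tag_ids total_tags taglist idx)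

-- ===== LEMMAS AND PROOFS =====

-- A's per-level scan, characterised by the first matching tag
theorem go_eq_find (tt : List (List (List (String × String)))) (tl : List String)
    (idx : Int) (L : List (List (String × String))) :
    getTagIdsGo tt tl idx L =
      match L.find? (fun tag => pvLookup tag "key" == PySem.List.pyGet? tl idx) with
      | none => [none]
      | some tag =>
        if idx ≥ (tt.length : Int) - 1 then [pvLookup tag "id"]
        else [pvLookup tag "id"] ++ getTagIdsGo tt tl (idx + 1) ((PySem.List.pyGet? tt (idx + 1)).getD []) := by
  induction L with
  | nil => simp [getTagIdsGo]
  | cons tag rest ih =>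
    by_cases h : pvLookup tag "key" == PySem.List.pyGet? tl idx
    · rw [getTagIdsGo]; simp [h]
    · rw [getTagIdsGo, if_neg (by simpa using h), ih]
      simp [h]

-- B's loop prepends its accumulator to A's result
theorem loop_eq_go (tt : List (List (List (String × String)))) (tl : List String)
    (i : Int) (acc : List (Option String)) :
    getTagIdsLoop tt tl i acc = acc ++ get_tag_ids tt tl i := by
  fun_induction getTagIdsLoop tt tl i acc with
  | case1 i acc hfind =>
    rw [get_tag_ids, go_eq_find, hfind]
  | case2 i acc tag hfind acc' hlast =>
    rw [get_tag_ids, go_eq_find, hfind]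
    simp [hlast, acc']
  | case3 i acc tag hfind acc' hlast ih =>
    rw [get_tag_ids, go_eq_find, hfind, ih, get_tag_ids]
    simp [hlast, acc']

-- ===== VERDICT (by name: the statement is the Claim_ definition above) =====
theorem get_tag_ids_spec : Claim_equal_get_tag_ids := by
  intro tt tl idx _ _
  unfold Spec_get_tag_ids get_tag_ids_alt
  rw [loop_eq_go]
  simp
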